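-- pv_equiv track=rewrite | github.com/milicas19/Task6 | adventOfCode/12.py | count
-- ===== SOURCE A (Python) =====
-- def count(word, numbers):
--     counter = []
--     counter_after = []
--     counter_num = []
--     upit = 0
--     tarab = 0
--     for w in word:
--         counter.append([tarab, upit])
--         if w == '#':
--             tarab += 1
--         elif w == '?':
--             upit += 1
--
--
--     for kk, w in enumerate(word):
--         if w == '#':
--             counter_after.append([tarab - counter[kk][0] -1, upit - counter[kk][1]])
--         elif w == '?':
--             counter_after.append([tarab - counter[kk][0], upit - counter[kk][1] - 1])
--         else:
--             counter_after.append([tarab - counter[kk][0], upit - counter[kk][1]])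
--
--     all = 0
--     for num in numbers:
--         all += num
--
--     counter_num.append([0, all - numbers[0]])
--     for i in range(1, len(numbers)):
--         counter_num.append([counter_num[i-1][0] + numbers[i-1], counter_num[i-1][1] - numbers[i]])
--     return counter, counter_after, counter_num
-- ===== SOURCE B (Python) =====
-- def count(word, numbers):
--     counter = []
--     h = q = 0
--     for w in word:
--         counter.append([h, q])
--         if w == '#':
--             h += 1
--         elif w == '?':
--             q += 1
--     rev = []
--     h = q = 0
--     for w in reversed(word):
--         rev.append([h, q])
--         if w == '#':
--             h += 1
--         elif w == '?':
--             q += 1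
--     counter_after = rev[::-1]
--     pref = []
--     s = 0
--     for num in numbers:
--         pref.append(s)
--         s += num
--     suff_rev = []
--     t = 0
--     for num in reversed(numbers):
--         suff_rev.append(t)
--         t += num
--     suff = suff_rev[::-1]
--     counter_num = [[p, s] for p, s in zip(pref, suff)]
--     return counter, counter_after, counter_num
-- ===== Notes on version B (the rewrite author's own statement) =====
-- stated objective: alternative
-- what changed: counter_after is built by a reverse sweep with running suffix accumulators (then reversed) instead of subtracting prefix counts from the final totals, and counter_num is the zip of an independent forward prefix-sum accumulator with a backward suffix-sum accumulator instead of the recurrence that reads the previous output row.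
-- crash fix: On empty numbers A raises IndexError at numbers[0]; B returns (counter, counter_after, []) there. — e.g. on count("#?", []): A raises IndexError, B returns ([[0, 0], [1, 0]], [[0, 1], [0, 0]], [])
import Mathlib
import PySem

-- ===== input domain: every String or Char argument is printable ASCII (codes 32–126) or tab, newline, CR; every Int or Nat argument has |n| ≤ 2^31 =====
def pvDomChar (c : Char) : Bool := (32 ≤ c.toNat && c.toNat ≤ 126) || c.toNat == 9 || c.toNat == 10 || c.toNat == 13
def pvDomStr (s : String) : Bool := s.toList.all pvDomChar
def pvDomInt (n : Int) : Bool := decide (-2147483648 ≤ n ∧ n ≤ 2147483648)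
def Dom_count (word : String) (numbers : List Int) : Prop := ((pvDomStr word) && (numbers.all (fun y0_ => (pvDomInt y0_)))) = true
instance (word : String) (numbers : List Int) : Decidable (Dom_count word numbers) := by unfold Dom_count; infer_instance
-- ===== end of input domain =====

-- B builds counter_after by a reverse sweep with running suffix counters and counter_num by zipping
-- forward prefix sums with backward suffix sums (alternative decomposition; no speed claim).

-- ===== PORT A =====
def count (word : String) (numbers : List Int) : List (List Int) × List (List Int) × List (List Int) :=
  let s := word.toList.foldl (fun (st : List (List Int) × Int × Int) w =>
      let c := st.1 ++ [[st.2.1, st.2.2]]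
      if w == '#' then (c, st.2.1 + 1, st.2.2)
      else if w == '?' then (c, st.2.1, st.2.2 + 1)
      else (c, st.2.1, st.2.2)) ([], 0, 0)
  let counter := s.1
  let tarab := s.2.1
  let upit := s.2.2
  let counter_after := (PySem.List.enumerate word.toList).foldl (fun ca kw =>
      let ck := PySem.List.pyGetD counter kw.1 []
      let c0 := PySem.List.pyGetD ck 0 0
      let c1 := PySem.List.pyGetD ck 1 0
      if kw.2 == '#' then ca ++ [[tarab - c0 - 1, upit - c1]]
      else if kw.2 == '?' then ca ++ [[tarab - c0, upit - c1 - 1]]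
      else ca ++ [[tarab - c0, upit - c1]]) []
  let all := numbers.foldl (fun a n => a + n) 0
  match PySem.List.pyGet? numbers 0 with
  | none => ([], [], [])   -- numbers[0] raises IndexError here; excluded by Pre_count
  | some n0 =>
    let cn := (PySem.List.pyRange 1 (numbers.length) 1).foldl (fun cn i =>
        let prev := PySem.List.pyGetD cn (i - 1) []
        cn ++ [[PySem.List.pyGetD prev 0 0 + PySem.List.pyGetD numbers (i - 1) 0,
                PySem.List.pyGetD prev 1 0 - PySem.List.pyGetD numbers i 0]])
        [[(0 : Int), all - n0]]
    (counter, counter_after, cn)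

-- ===== PORT B =====
def count_alt (word : String) (numbers : List Int) : List (List Int) × List (List Int) × List (List Int) :=
  let s := word.toList.foldl (fun (st : List (List Int) × Int × Int) w =>
      let c := st.1 ++ [[st.2.1, st.2.2]]
      if w == '#' then (c, st.2.1 + 1, st.2.2)
      else if w == '?' then (c, st.2.1, st.2.2 + 1)
      else (c, st.2.1, st.2.2)) ([], 0, 0)
  let counter := s.1
  let r := word.toList.reverse.foldl (fun (st : List (List Int) × Int × Int) w =>
      let c := st.1 ++ [[st.2.1, st.2.2]]
      if w == '#' then (c, st.2.1 + 1, st.2.2)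
      else if w == '?' then (c, st.2.1, st.2.2 + 1)
      else (c, st.2.1, st.2.2)) ([], 0, 0)
  let counter_after := r.1.reverse
  let pr := numbers.foldl (fun (st : List Int × Int) n => (st.1 ++ [st.2], st.2 + n)) ([], 0)
  let sr := numbers.reverse.foldl (fun (st : List Int × Int) n => (st.1 ++ [st.2], st.2 + n)) ([], 0)
  let counter_num := (pr.1.zip sr.1.reverse).map (fun p => [p.1, p.2])
  (counter, counter_after, counter_num)

-- ===== PRECONDITION & SPEC =====
-- Pre_count excludes only empty `numbers`, on which A raises IndexError at numbers[0].
def Pre_count (word : String) (numbers : List Int) : Prop := numbers ≠ []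
instance (word : String) (numbers : List Int) : Decidable (Pre_count word numbers) := by unfold Pre_count; infer_instance
def pvWitness_count : String × List Int := ("#?.a", [1, 2, 3])

-- On empty numbers A raises IndexError (numbers[0]); B returns (counter, counter_after, []).
def Raises_count (word : String) (numbers : List Int) : Prop := numbers = []
instance (word : String) (numbers : List Int) : Decidable (Raises_count word numbers) := by unfold Raises_count; infer_instance
def pvRaiseWitness_count : String × List Int := ("#?", [])
def pvRaiseWitnessOut_count : List (List Int) × List (List Int) × List (List Int) :=
  ([[0, 0], [1, 0]], [[0, 1], [0, 0]], [])

def Spec_count (word : String) (numbers : List Int) (out : List (List Int) × List (List Int) × List (List Int)) : Prop := out = count_alt word numbers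
instance (word : String) (numbers : List Int) (out : List (List Int) × List (List Int) × List (List Int)) : Decidable (Spec_count word numbers out) := by unfold Spec_count; infer_instance

-- ===== CLAIM (what is proved, stated in full; the proofs are below) =====
def Claim_equal_count : Prop := ∀ (word : String) (numbers : List Int), Dom_count word numbers → Pre_count word numbers → Spec_count word numbers (count word numbers)
def Claim_raises_count : Prop := (∀ (word : String) (numbers : List Int), Dom_count word numbers → Raises_count word numbers → ¬ Pre_count word numbers) ∧ (Dom_count (pvRaiseWitness_count.1) (pvRaiseWitness_count.2) ∧ Raises_count (pvRaiseWitness_count.1) (pvRaiseWitness_count.2) ∧ count_alt (pvRaiseWitness_count.1) (pvRaiseWitness_count.2) = pvRaiseWitnessOut_count)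

-- ===== LEMMAS AND PROOFS =====

-- per-character contributions of A's if/elif chain
def cH (w : Char) : Int := if w == '#' then 1 else 0
def cQ (w : Char) : Int := if w == '?' then 1 else 0
def totH (l : List Char) : Int := (l.map cH).sum
def totQ (l : List Char) : Int := (l.map cQ).sum
-- snapshots appended by the prefix loop, starting from counts (t, u)
def pcs (t u : Int) : List Char → List (List Int)
  | [] => []
  | w :: ws => [t, u] :: pcs (t + cH w) (u + cQ w) ws
-- suffix counts strictly after each position
def afterSpec : List Char → List (List Int)
  | [] => []
  | _ :: ws => [totH ws, totQ ws] :: afterSpec ws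
-- prefix-sum snapshots starting from s
def pss (s : Int) : List Int → List Int
  | [] => []
  | x :: xs => s :: pss (s + x) xs

theorem totH_reverse (l : List Char) : totH l.reverse = totH l := by simp [totH]
theorem totQ_reverse (l : List Char) : totQ l.reverse = totQ l := by simp [totQ]

theorem fold1 (l : List Char) (acc : List (List Int)) (t u : Int) :
    l.foldl (fun (st : List (List Int) × Int × Int) w =>
      let c := st.1 ++ [[st.2.1, st.2.2]]
      if w == '#' then (c, st.2.1 + 1, st.2.2)
      else if w == '?' then (c, st.2.1, st.2.2 + 1)
      else (c, st.2.1, st.2.2)) (acc, t, u)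
    = (acc ++ pcs t u l, t + totH l, u + totQ l) := by
  induction l generalizing acc t u with
  | nil => simp [pcs, totH, totQ]
  | cons w ws ih =>
    simp only [List.foldl_cons]
    split_ifs with h1 h2
    · simp only [beq_iff_eq] at h1; subst h1
      rw [ih]; simp [pcs, totH, totQ, cH, cQ, add_comm, add_left_comm]
    · simp only [beq_iff_eq] at h2; subst h2
      rw [ih]; simp [pcs, totH, totQ, cH, cQ, h1, add_comm, add_left_comm]
    · rw [ih]; simp [pcs, totH, totQ, cH, cQ, h1, h2, add_comm]

theorem fold2 (l : List Int) (acc : List Int) (s : Int) :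
    l.foldl (fun (st : List Int × Int) n => (st.1 ++ [st.2], st.2 + n)) (acc, s)
    = (acc ++ pss s l, s + l.sum) := by
  induction l generalizing acc s with
  | nil => simp [pss]
  | cons x xs ih =>
    simp only [List.foldl_cons]
    rw [ih]; simp [pss, add_assoc]

theorem pcs_length (t u : Int) (l : List Char) : (pcs t u l).length = l.length := by
  induction l generalizing t u with
  | nil => simp [pcs]
  | cons w ws ih => simp [pcs, ih]

theorem pcs_getElem (t u : Int) (l : List Char) (k : Nat) (h : k < (pcs t u l).length) :
    (pcs t u l)[k] = [t + totH (l.take k), u + totQ (l.take k)] := by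
  induction l generalizing t u k with
  | nil => simp [pcs] at h
  | cons w ws ih =>
    cases k with
    | zero => simp [pcs, totH, totQ]
    | succ k =>
      simp only [pcs, List.getElem_cons_succ]
      rw [ih]
      simp [totH, totQ, add_assoc]

theorem afterSpec_length (l : List Char) : (afterSpec l).length = l.length := by
  induction l with
  | nil => simp [afterSpec]
  | cons w ws ih => simp [afterSpec, ih]

theorem afterSpec_getElem (l : List Char) (k : Nat) (h : k < (afterSpec l).length) :
    (afterSpec l)[k] = [totH (l.drop (k + 1)), totQ (l.drop (k + 1))] := by
  induction l generalizing k with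
  | nil => simp [afterSpec] at h
  | cons w ws ih =>
    cases k with
    | zero => simp [afterSpec]
    | succ k =>
      simp only [afterSpec, List.getElem_cons_succ]
      rw [ih]
      simp

theorem pss_length (s : Int) (l : List Int) : (pss s l).length = l.length := by
  induction l generalizing s with
  | nil => simp [pss]
  | cons x xs ih => simp [pss, ih]

theorem pss_getElem (s : Int) (l : List Int) (k : Nat) (h : k < (pss s l).length) :
    (pss s l)[k] = s + (l.take k).sum := by
  induction l generalizing s k with
  | nil => simp [pss] at h
  | cons x xs ih =>
    cases k with
    | zero => simp [pss]
    | succ k =>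
      simp only [pss, List.getElem_cons_succ]
      rw [ih]
      simp [add_assoc]

theorem enumLen {α : Type} (l : List α) (s : Int) : (PySem.List.enumerate l s).length = l.length := by
  induction l generalizing s <;> simp_all [PySem.List.enumerate]

theorem enumGet {α : Type} (l : List α) (s : Int) (k : Nat) (h : k < (PySem.List.enumerate l s).length)
    (h2 : k < l.length) : (PySem.List.enumerate l s)[k] = (s + k, l[k]) := by
  induction l generalizing s k with
  | nil => simp at h2
  | cons x xs ih =>
    cases k with
    | zero => simp [PySem.List.enumerate]
    | succ k =>
      simp only [PySem.List.enumerate_cons, List.getElem_cons_succ]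
      rw [ih] <;> simp_all [PySem.List.enumerate]
      ring

theorem sum_split (L : List Int) (k : Nat) (h : k < L.length) :
    L.sum = (L.take k).sum + L[k] + (L.drop (k + 1)).sum := by
  conv_lhs => rw [← List.take_append_drop (k + 1) L]
  rw [List.sum_append, List.sum_take_succ _ _ h]

theorem totH_split (l : List Char) (k : Nat) (h : k < l.length) :
    totH l = totH (l.take k) + cH l[k] + totH (l.drop (k + 1)) := by
  have := sum_split (l.map cH) k (by simpa using h)
  simpa [totH, List.map_take, List.map_drop] using this

theorem totQ_split (l : List Char) (k : Nat) (h : k < l.length) :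
    totQ l = totQ (l.take k) + cQ l[k] + totQ (l.drop (k + 1)) := by
  have := sum_split (l.map cQ) k (by simpa using h)
  simpa [totQ, List.map_take, List.map_drop] using this

theorem afterA (l : List Char) :
    (PySem.List.enumerate l).foldl (fun ca (kw : Int × Char) =>
      let ck := PySem.List.pyGetD (pcs 0 0 l) kw.1 []
      let c0 := PySem.List.pyGetD ck 0 0
      let c1 := PySem.List.pyGetD ck 1 0
      if kw.2 == '#' then ca ++ [[totH l - c0 - 1, totQ l - c1]]
      else if kw.2 == '?' then ca ++ [[totH l - c0, totQ l - c1 - 1]]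
      else ca ++ [[totH l - c0, totQ l - c1]]) []
    = afterSpec l := by
  have hb : (fun (ca : List (List Int)) (kw : Int × Char) =>
      let ck := PySem.List.pyGetD (pcs 0 0 l) kw.1 []
      let c0 := PySem.List.pyGetD ck 0 0
      let c1 := PySem.List.pyGetD ck 1 0
      if kw.2 == '#' then ca ++ [[totH l - c0 - 1, totQ l - c1]]
      else if kw.2 == '?' then ca ++ [[totH l - c0, totQ l - c1 - 1]]
      else ca ++ [[totH l - c0, totQ l - c1]])
      = fun ca kw => ca ++
        [[totH l - PySem.List.pyGetD (PySem.List.pyGetD (pcs 0 0 l) kw.1 []) 0 0 - cH kw.2,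
          totQ l - PySem.List.pyGetD (PySem.List.pyGetD (pcs 0 0 l) kw.1 []) 1 0 - cQ kw.2]] := by
    funext ca kw
    by_cases h1 : kw.2 = '#'
    · simp [h1, cH, cQ]
    · by_cases h2 : kw.2 = '?' <;> simp [h1, h2, cH, cQ]
  rw [hb, PySem.List.foldl_append_singleton_eq_map]
  apply List.ext_getElem
  · simp [afterSpec_length]
  · intro k h1 h2
    have hk : k < l.length := by simpa [afterSpec_length] using h2
    simp only [List.nil_append, List.getElem_map]
    rw [enumGet l 0 k (by simpa [enumLen, afterSpec_length] using h1) hk]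
    simp only [zero_add]
    rw [afterSpec_getElem l k h2]
    have hg : PySem.List.pyGetD (pcs 0 0 l) ((k : Nat) : Int) [] = [totH (l.take k), totQ (l.take k)] := by
      rw [PySem.List.pyGetD_natCast]
      rw [List.getD_eq_getElem _ _ (by simpa [pcs_length] using hk)]
      rw [pcs_getElem]
      simp
    rw [hg]
    have p0 : ∀ a b : Int, PySem.List.pyGetD [a, b] 0 0 = a := fun a b => rfl
    have p1 : ∀ a b : Int, PySem.List.pyGetD [a, b] 1 0 = b := fun a b => rfl
    rw [p0, p1]
    have hH := totH_split l k hk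
    have hQ := totQ_split l k hk
    simp only [List.cons.injEq, and_true]
    constructor <;> omega

theorem afterB (l : List Char) : (pcs 0 0 l.reverse).reverse = afterSpec l := by
  apply List.ext_getElem
  · simp [pcs_length, afterSpec_length]
  · intro k h1 h2
    have hk : k < l.length := by simpa [pcs_length] using h1
    rw [List.getElem_reverse]
    rw [pcs_getElem]
    rw [afterSpec_getElem l k h2]
    have hlen : (pcs 0 0 l.reverse).length = l.length := by simp [pcs_length]
    have hidx : l.length - ((pcs 0 0 l.reverse).length - 1 - k) = k + 1 := by
      simp only [pcs_length, List.length_reverse]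
      omega
    have htake : l.reverse.take ((pcs 0 0 l.reverse).length - 1 - k) = (l.drop (k + 1)).reverse := by
      rw [List.take_reverse, hidx]
    rw [htake, totH_reverse, totQ_reverse]
    simp

theorem cnA (x : Int) (xs : List Int) (m : Nat) (hm1 : 1 ≤ m) (hm2 : m ≤ (x :: xs).length) :
    (PySem.List.pyRange 1 (m : Int) 1).foldl (fun cn i =>
        let prev := PySem.List.pyGetD cn (i - 1) []
        cn ++ [[PySem.List.pyGetD prev 0 0 + PySem.List.pyGetD (x :: xs) (i - 1) 0,
                PySem.List.pyGetD prev 1 0 - PySem.List.pyGetD (x :: xs) i 0]])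
        [[(0 : Int), (x :: xs).sum - x]]
    = (List.range m).map (fun k => [((x :: xs).take k).sum, ((x :: xs).drop (k + 1)).sum]) := by
  induction m, hm1 using Nat.le_induction with
  | base =>
    rw [PySem.List.pyRange_one_eq_nil (by norm_num)]
    simp [List.range_one]
  | succ m hm ih =>
    have hmlen : m < (x :: xs).length := by omega
    have hstep : PySem.List.pyRange 1 (((m + 1 : Nat)) : Int) 1
        = PySem.List.pyRange 1 (m : Int) 1 ++ [(m : Int)] := by
      exact_mod_cast PySem.List.pyRange_one_succ_right (b := (m : Int)) (by exact_mod_cast hm)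
    rw [hstep, List.foldl_append, ih (by omega)]
    have e1 : ((m : Int) - 1) = ((m - 1 : Nat) : Int) := by omega
    have hm1' : m - 1 < m := by omega
    have hprev : PySem.List.pyGetD
        ((List.range m).map (fun k => [((x :: xs).take k).sum, ((x :: xs).drop (k + 1)).sum]))
        ((m : Int) - 1) []
        = [((x :: xs).take (m - 1)).sum, ((x :: xs).drop m).sum] := by
      rw [e1, PySem.List.pyGetD_natCast]
      rw [List.getD_eq_getElem _ _ (by simpa using hm1')]
      simp only [List.getElem_map, List.getElem_range]
      rw [show m - 1 + 1 = m from by omega]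
    have hnum1 : PySem.List.pyGetD (x :: xs) ((m : Int) - 1) 0 = (x :: xs)[m - 1] := by
      rw [e1, PySem.List.pyGetD_natCast]
      exact List.getD_eq_getElem _ _ (by omega)
    have hnum2 : PySem.List.pyGetD (x :: xs) ((m : Nat) : Int) 0 = (x :: xs)[m] := by
      rw [PySem.List.pyGetD_natCast]
      exact List.getD_eq_getElem _ _ hmlen
    simp only [List.foldl_cons, List.foldl_nil, hprev, hnum1, hnum2]
    have p0 : ∀ a b : Int, PySem.List.pyGetD [a, b] 0 0 = a := fun a b => rfl
    have p1 : ∀ a b : Int, PySem.List.pyGetD [a, b] 1 0 = b := fun a b => rfl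
    rw [p0, p1]
    rw [List.range_succ, List.map_append]
    congr 1
    have hsucc : ((x :: xs).take (m - 1 + 1)).sum = ((x :: xs).take (m - 1)).sum + (x :: xs)[m - 1] :=
      List.sum_take_succ _ _ (by omega)
    have hmm : m - 1 + 1 = m := by omega
    rw [hmm] at hsucc
    have hdrop : (x :: xs).drop m = (x :: xs)[m] :: (x :: xs).drop (m + 1) :=
      List.drop_eq_getElem_cons hmlen
    simp only [List.map_cons, List.map_nil, List.cons.injEq, and_true]
    refine ⟨?_, ?_⟩
    · rw [hsucc]
    · rw [hdrop, List.sum_cons]; omega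

theorem cnB (numbers : List Int) :
    ((pss 0 numbers).zip (pss 0 numbers.reverse).reverse).map (fun p => [p.1, p.2])
    = (List.range numbers.length).map
        (fun k => [(numbers.take k).sum, (numbers.drop (k + 1)).sum]) := by
  apply List.ext_getElem
  · simp [pss_length]
  · intro k h1 h2
    have hk : k < numbers.length := by simpa using h2
    simp only [List.getElem_map, List.getElem_zip, List.getElem_range]
    rw [pss_getElem _ _ _ (by simpa [pss_length] using hk)]
    rw [List.getElem_reverse]
    rw [pss_getElem]
    have hidx : numbers.length - ((pss 0 numbers.reverse).length - 1 - k) = k + 1 := by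
      simp only [pss_length, List.length_reverse]
      omega
    have htake : numbers.reverse.take ((pss 0 numbers.reverse).length - 1 - k)
        = (numbers.drop (k + 1)).reverse := by
      rw [List.take_reverse, hidx]
    rw [htake]
    simp

theorem count_eq (word : String) (numbers : List Int) (hpre : numbers ≠ []) :
    count word numbers = count_alt word numbers := by
  obtain ⟨x, xs, rfl⟩ := List.exists_cons_of_ne_nil hpre
  unfold count count_alt
  simp only [fold1, fold2, List.nil_append, zero_add, PySem.List.pyGet?_zero_cons]
  have hsum : (x :: xs).foldl (fun a n => a + n) 0 = (x :: xs).sum := by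
    simp [List.sum_eq_foldl]
  rw [hsum]
  simp only [Prod.mk.injEq]
  refine ⟨trivial, ?_, ?_⟩
  · exact (afterA word.toList).trans (afterB word.toList).symm
  · exact (cnA x xs (x :: xs).length (by simp) le_rfl).trans (cnB (x :: xs)).symm

-- ===== VERDICT (by name: the statement is the Claim_ definition above) =====
theorem count_spec : Claim_equal_count := by
  intro word numbers _ hpre
  unfold Spec_count
  exact count_eq word numbers hpre

theorem count_raises : Claim_raises_count := by
  unfold Claim_raises_count
  exact ⟨fun _ _ _ h hp => hp h, by decide⟩

-- self-check: B's port indeed returns the stated literal value at the raise witness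
theorem count_raises_witness_ok :
    count_alt (pvRaiseWitness_count.1) (pvRaiseWitness_count.2) = pvRaiseWitnessOut_count :=
  count_raises.2.2.2
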